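-- pv_equiv track=rewrite | github.com/csnick93/StarCraftBuilder | src/framework/convertTechTreeToCode.py | filterTerranData
-- ===== SOURCE A (Python) =====
-- def filterTerranData(dataMatrix):
--     copy = False
--     terranData = []
--     for row in dataMatrix:
--         if "Terran" in row[0]:
--             # set copy to true as soon as we have reached the terran data
--             copy = True
--             continue
--         if copy and not "#" in row[0]:
--             terranData.append(row)
--     return terranData
-- ===== SOURCE B (Python) =====
-- def filterTerranData(dataMatrix):
--     start = next((i for i, row in enumerate(dataMatrix) if "Terran" in row[0]), None)
--     if start is None:
--         return []
--     return [row for row in dataMatrix[start + 1:]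
--             if "#" not in row[0] and "Terran" not in row[0]]
-- ===== Notes on version B (the rewrite author's own statement) =====
-- stated objective: simpler
-- what changed: Replaces A's stateful copy-flag single pass with a locate-then-filter decomposition: find the index of the first 'Terran' row, then filter the tail with one comprehension.
import Mathlib
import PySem

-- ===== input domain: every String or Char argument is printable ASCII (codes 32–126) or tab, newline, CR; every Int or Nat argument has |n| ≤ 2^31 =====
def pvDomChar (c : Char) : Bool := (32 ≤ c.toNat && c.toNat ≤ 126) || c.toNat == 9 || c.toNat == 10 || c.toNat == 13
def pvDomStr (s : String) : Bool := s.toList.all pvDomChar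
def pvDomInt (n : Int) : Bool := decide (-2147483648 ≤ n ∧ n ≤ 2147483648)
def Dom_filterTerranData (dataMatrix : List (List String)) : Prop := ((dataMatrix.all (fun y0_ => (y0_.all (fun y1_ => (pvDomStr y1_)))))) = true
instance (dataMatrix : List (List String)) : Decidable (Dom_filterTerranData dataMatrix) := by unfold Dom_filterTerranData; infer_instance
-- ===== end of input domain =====

-- B replaces A's stateful copy-flag pass with a locate-the-first-Terran-row-then-filter-the-tail
-- decomposition (objective: simpler).

-- ===== PORT A =====
-- A's loop body as a step function over the state (copy, terranData).
def pvStepA (st : Bool × List (List String)) (row : List String) : Bool × List (List String) :=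
  let s := (PySem.List.pyGet? row 0).getD ""   -- row[0]; Pre_ excludes empty rows (IndexError)
  if PySem.Str.isIn "Terran" s then (true, st.2)
  else if st.1 && !(PySem.Str.isIn "#" s) then (st.1, st.2 ++ [row])
  else st

def filterTerranData (dataMatrix : List (List String)) : List (List String) :=
  (dataMatrix.foldl pvStepA (false, [])).2

-- ===== PORT B =====
def pvHead0 (row : List String) : String := (PySem.List.pyGet? row 0).getD ""

def filterTerranData_alt (dataMatrix : List (List String)) : List (List String) :=
  match dataMatrix.findIdx? (fun row => PySem.Str.isIn "Terran" (pvHead0 row)) with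
  | none => []
  | some i =>
      (PySem.List.slice dataMatrix (some ((i : Int) + 1)) none).filter
        (fun row => !(PySem.Str.isIn "#" (pvHead0 row)) && !(PySem.Str.isIn "Terran" (pvHead0 row)))

-- ===== PRECONDITION & SPEC =====
-- Pre_ excludes matrices containing an empty row: there Python A raises IndexError on row[0].
def Pre_filterTerranData (dataMatrix : List (List String)) : Prop :=
  (dataMatrix.all (fun row => !row.isEmpty)) = true
instance (dataMatrix : List (List String)) : Decidable (Pre_filterTerranData dataMatrix) := by
  unfold Pre_filterTerranData; infer_instance

def pvWitness_filterTerranData : List (List String) := [["a"], ["Terran units"], ["marine", "50"], ["#c"]]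

def Spec_filterTerranData (dataMatrix : List (List String)) (out : List (List String)) : Prop := out = filterTerranData_alt dataMatrix
instance (dataMatrix : List (List String)) (out : List (List String)) : Decidable (Spec_filterTerranData dataMatrix out) := by unfold Spec_filterTerranData; infer_instance

-- ===== CLAIM (what is proved, stated in full; the proofs are below) =====
def Claim_equal_filterTerranData : Prop := ∀ (dataMatrix : List (List String)), Dom_filterTerranData dataMatrix → Pre_filterTerranData dataMatrix → Spec_filterTerranData dataMatrix (filterTerranData dataMatrix)

-- ===== LEMMAS AND PROOFS =====

-- the filter predicate of B
def pvKeep (row : List String) : Bool :=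
  !(PySem.Str.isIn "#" (pvHead0 row)) && !(PySem.Str.isIn "Terran" (pvHead0 row))

-- Once copy is true, A appends exactly the rows B's filter keeps (and copy stays true).
theorem pvFoldTrue (l : List (List String)) (acc : List (List String)) :
    l.foldl pvStepA (true, acc) = (true, acc ++ l.filter pvKeep) := by
  induction l generalizing acc with
  | nil => simp
  | cons r l ih =>
    by_cases hT : PySem.Chars.isIn ['T','e','r','r','a','n'] ((PySem.List.pyGet? r 0).getD "").toList = true
    · simp [pvStepA, pvHead0, pvKeep, hT, ih]
    · by_cases hH : PySem.Chars.isIn ['#'] ((PySem.List.pyGet? r 0).getD "").toList = true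
      · simp [pvStepA, pvHead0, pvKeep, hT, hH, ih]
      · simp [pvStepA, pvHead0, pvKeep, hT, hH, ih]

theorem pvSliceShift (x : List String) (xs : List (List String)) (i : Nat) :
    PySem.List.slice (x :: xs) (some (((i + 1 : Nat) : Int) + 1)) none
      = PySem.List.slice xs (some (((i : Nat) : Int) + 1)) none := by
  rw [show (((i + 1 : Nat) : Int) + 1) = ((i + 2 : Nat) : Int) by push_cast; ring,
      PySem.List.slice_from_natCast,
      show (((i : Nat) : Int) + 1) = ((i + 1 : Nat) : Int) by push_cast; ring,
      PySem.List.slice_from_natCast]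
  simp

theorem pvMain (l : List (List String)) : filterTerranData l = filterTerranData_alt l := by
  induction l with
  | nil => rfl
  | cons r l ih =>
    by_cases hT : PySem.Chars.isIn ['T','e','r','r','a','n'] ((PySem.List.pyGet? r 0).getD "").toList = true
    · -- first Terran row is r: A switches copy on, B filters the tail
      have hA : filterTerranData (r :: l) = l.filter pvKeep := by
        simp [filterTerranData, pvStepA, hT, pvFoldTrue]
      have hB : filterTerranData_alt (r :: l) = l.filter pvKeep := by
        simp only [filterTerranData_alt, List.findIdx?_cons]
        rw [if_pos (by simpa [pvHead0] using hT)]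
        show List.filter _ (PySem.List.slice (r :: l) (some (((0 : Nat) : Int) + 1)) none) = _
        rw [show (((0 : Nat) : Int) + 1) = ((1 : Nat) : Int) by norm_num,
            PySem.List.slice_from_natCast]
        have hp : (fun row => !(PySem.Str.isIn "#" (pvHead0 row)) && !(PySem.Str.isIn "Terran" (pvHead0 row))) = pvKeep := by
          funext row; simp [pvKeep]
        rw [hp]
        rfl
      rw [hA, hB]
    · have hA : filterTerranData (r :: l) = filterTerranData l := by
        simp [filterTerranData, pvStepA, hT]
      have hB : filterTerranData_alt (r :: l) = filterTerranData_alt l := by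
        simp only [filterTerranData_alt, List.findIdx?_cons]
        rw [if_neg (by simpa [pvHead0] using hT)]
        cases h : l.findIdx? (fun row => PySem.Str.isIn "Terran" (pvHead0 row)) with
        | none => rfl
        | some i =>
            show List.filter _ (PySem.List.slice (r :: l) (some (((i + 1 : Nat) : Int) + 1)) none) = _
            rw [pvSliceShift]
      rw [hA, hB, ih]

-- ===== VERDICT (by name: the statement is the Claim_ definition above) =====
theorem filterTerranData_spec : Claim_equal_filterTerranData := by
  intro dm _ _
  unfold Spec_filterTerranData
  exact pvMain dm
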